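-- pv_equiv track=rewrite | github.com/SVCE-ACM/A-December-Of_Algorithms-2024 | December 14/python_iamsurya2904_14.py | can_split_squad
-- ===== SOURCE A (Python) =====
-- from collections import Counter
--
-- def can_split_squad(N, K, D, A):
--   subject_counts = Counter(A)
--   unique_subjects = len(subject_counts)
--
--   if unique_subjects < K:
--     return "NO"
--
--   max_team_size = (N + D) // 2
--   min_team_size = (N - D) // 2
--
--   if sum(count for count in subject_counts.values() if count <= min_team_size) < K:
--     return "NO"
--
--   return "YES"
-- ===== SOURCE B (Python) =====
-- def can_split_squad(N, K, D, A):
--     S = sorted(A)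
--     m = (N - D) // 2
--     distinct = 0
--     total = 0
--     i = 0
--     n = len(S)
--     while i < n:
--         j = i + 1
--         while j < n and S[j] == S[i]:
--             j += 1
--         run = j - i
--         distinct += 1
--         if run <= m:
--             total += run
--         i = j
--     if distinct < K or total < K:
--         return "NO"
--     return "YES"
-- ===== Notes on version B (the rewrite author's own statement) =====
-- stated objective: alternative
-- what changed: Replaces the Counter hash-count with sorting a copy of A and a single two-pointer scan over the sorted list that counts runs (distinct subjects) and accumulates the lengths of runs not exceeding min_team_size.
import Mathlib
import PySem

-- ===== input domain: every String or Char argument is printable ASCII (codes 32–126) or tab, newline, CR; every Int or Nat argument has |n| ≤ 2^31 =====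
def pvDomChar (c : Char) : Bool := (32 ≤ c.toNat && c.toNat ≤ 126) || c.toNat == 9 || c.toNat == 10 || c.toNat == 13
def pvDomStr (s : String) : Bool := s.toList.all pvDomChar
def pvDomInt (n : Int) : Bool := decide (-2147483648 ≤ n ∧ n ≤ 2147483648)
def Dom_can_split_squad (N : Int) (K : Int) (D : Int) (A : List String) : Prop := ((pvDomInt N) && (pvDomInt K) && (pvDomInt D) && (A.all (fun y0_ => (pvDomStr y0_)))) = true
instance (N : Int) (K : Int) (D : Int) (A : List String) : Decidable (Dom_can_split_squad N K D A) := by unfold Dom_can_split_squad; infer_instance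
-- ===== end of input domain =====

-- B replaces A's Counter with sorting a copy of A and one run-length scan over the sorted list (alternative algorithm, same results).

-- ===== PORT A =====
def can_split_squad (N : Int) (K : Int) (D : Int) (A : List String) : String :=
  let subject_counts := PySem.Dict.counter A
  let unique_subjects : Int := subject_counts.size
  if unique_subjects < K then "NO"
  else
    let _max_team_size := PySem.Int.floordiv (N + D) 2
    let min_team_size := PySem.Int.floordiv (N - D) 2
    if ((subject_counts.values.filter (fun c => c ≤ min_team_size)).sum) < K then "NO"
    else "YES"

-- ===== PORT B =====
-- the outer while loop of Source B: strip the leading run of equal subjects (the inner while), recurse on the rest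
def pvRunScan (m : Int) : List String → Int × Int
  | [] => (0, 0)
  | x :: xs =>
    let run : Int := (xs.takeWhile (fun y => y == x)).length + 1
    let p := pvRunScan m (xs.dropWhile (fun y => y == x))
    (p.1 + 1, if run ≤ m then p.2 + run else p.2)
termination_by S => S.length
decreasing_by
  simpa using Nat.lt_succ_of_le (List.length_dropWhile_le _ _)

def can_split_squad_alt (N : Int) (K : Int) (D : Int) (A : List String) : String :=
  let S := PySem.List.sorted A (fun s => s) false
  let m := PySem.Int.floordiv (N - D) 2
  let p := pvRunScan m S
  if p.1 < K ∨ p.2 < K then "NO" else "YES"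

-- ===== PRECONDITION & SPEC =====
def Spec_can_split_squad (N : Int) (K : Int) (D : Int) (A : List String) (out : String) : Prop := out = can_split_squad_alt N K D A
instance (N : Int) (K : Int) (D : Int) (A : List String) (out : String) : Decidable (Spec_can_split_squad N K D A out) := by unfold Spec_can_split_squad; infer_instance

-- ===== CLAIM (what is proved, stated in full; the proofs are below) =====
def Claim_equal_can_split_squad : Prop := ∀ (N : Int) (K : Int) (D : Int) (A : List String), Dom_can_split_squad N K D A → Spec_can_split_squad N K D A (can_split_squad N K D A)

-- ===== LEMMAS AND PROOFS =====

-- the per-subject contribution to A's filtered sum of counts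
def pvContrib (m : Int) (c : Int) : Int := if c ≤ m then c else 0

theorem pv_not_mem_dropWhile (x : String) (xs : List String)
    (hx : ∀ y ∈ xs, x ≤ y) (hp : xs.Pairwise (fun a b => a ≤ b)) :
    x ∉ xs.dropWhile (fun y => y == x) := by
  intro hmem
  cases hdw : xs.dropWhile (fun y => y == x) with
  | nil => rw [hdw] at hmem; simp at hmem
  | cons h₀ t =>
    rw [hdw] at hmem
    have hne : xs.dropWhile (fun y => y == x) ≠ [] := by simp [hdw]
    have hhead := List.head_dropWhile_not (fun y => y == x) hne
    have h₀x : h₀ ≠ x := by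
      intro h; rw [show (xs.dropWhile (fun y => y == x)).head hne = h₀ by simp [hdw], h] at hhead
      simp at hhead
    have hsub : (h₀ :: t).Sublist xs := hdw ▸ List.dropWhile_sublist _
    have hxlt : x < h₀ := lt_of_le_of_ne (hx _ (hsub.mem (by simp))) (Ne.symm h₀x)
    have hpdw : (h₀ :: t).Pairwise (fun a b => a ≤ b) := hp.sublist hsub
    rcases List.mem_cons.1 hmem with heq | hmem
    · exact h₀x heq.symm
    · exact absurd (lt_of_lt_of_le hxlt ((List.pairwise_cons.1 hpdw).1 x hmem)) (lt_irrefl x)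

-- pvRunScan on a sorted list returns the number of distinct subjects and the filtered sum of their multiplicities
theorem pvRunScan_sorted (m : Int) (S : List String)
    (h : S.Pairwise (fun a b => a ≤ b)) :
    pvRunScan m S = ((S.toFinset.card : Int), ∑ k ∈ S.toFinset, pvContrib m (S.count k : Int)) := by
  fun_induction pvRunScan m S with
  | case1 => simp
  | case2 x xs run p IH =>
    rw [List.pairwise_cons] at h
    obtain ⟨hx, hp⟩ := h
    have hpair_dw : (xs.dropWhile (fun y => y == x)).Pairwise (fun a b => a ≤ b) :=
      hp.sublist (List.dropWhile_sublist _)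
    have hxdw := pv_not_mem_dropWhile x xs hx hp
    have htw : ∀ y ∈ xs.takeWhile (fun y => y == x), y = x := by
      intro y hy; exact eq_of_beq (List.mem_takeWhile_imp (p := fun y => y == x) hy)
    have hsplit : xs.takeWhile (fun y => y == x) ++ xs.dropWhile (fun y => y == x) = xs :=
      List.takeWhile_append_dropWhile
    have hfin : (x :: xs).toFinset = insert x (xs.dropWhile (fun y => y == x)).toFinset := by
      ext a
      simp only [List.toFinset_cons, Finset.mem_insert, List.mem_toFinset]
      constructor
      · rintro (rfl | ha)
        · exact Or.inl rfl
        · rw [← hsplit] at ha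
          rcases List.mem_append.1 ha with h | h
          · exact Or.inl (htw a h)
          · exact Or.inr h
      · rintro (rfl | ha)
        · exact Or.inl rfl
        · refine Or.inr ?_; rw [← hsplit]; exact List.mem_append.2 (Or.inr ha)
    have hxnotfin : x ∉ (xs.dropWhile (fun y => y == x)).toFinset := by
      simpa [List.mem_toFinset] using hxdw
    have htwlen : xs.count x = (xs.takeWhile (fun y => y == x)).length := by
      have h0 : ((xs.takeWhile (fun y => y == x)) ++ (xs.dropWhile (fun y => y == x))).count x
          = (xs.takeWhile (fun y => y == x)).length := by
        rw [List.count_append, List.count_eq_zero.2 hxdw,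
          List.count_eq_length.2 (by intro y hy; simp [htw y hy])]
        omega
      rw [hsplit] at h0; exact h0
    have hcountx : ((x :: xs).count x : Int) = run := by
      simp [List.count_cons_self, htwlen, run]
    have hcountk : ∀ k ∈ (xs.dropWhile (fun y => y == x)).toFinset,
        (x :: xs).count k = (xs.dropWhile (fun y => y == x)).count k := by
      intro k hk
      have hkdw : k ∈ xs.dropWhile (fun y => y == x) := List.mem_toFinset.1 hk
      have hkx : k ≠ x := by rintro rfl; exact hxdw hkdw
      have h0 : ((xs.takeWhile (fun y => y == x)) ++ (xs.dropWhile (fun y => y == x))).count k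
          = (xs.dropWhile (fun y => y == x)).count k := by
        rw [List.count_append, List.count_eq_zero.2 (fun hmem => hkx (htw k hmem))]
        omega
      rw [hsplit] at h0
      rw [List.count_cons_of_ne (Ne.symm hkx), h0]
    have hP := IH hpair_dw
    rw [Prod.mk.injEq]
    constructor
    · rw [show p.1 = ((xs.dropWhile (fun y => y == x)).toFinset.card : Int) from congrArg Prod.fst hP,
        hfin, Finset.card_insert_of_notMem hxnotfin]
      push_cast; ring
    · rw [show p.2 = ∑ k ∈ (xs.dropWhile (fun y => y == x)).toFinset,
          pvContrib m ((xs.dropWhile (fun y => y == x)).count k : Int) from congrArg Prod.snd hP,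
        hfin, Finset.sum_insert hxnotfin, hcountx,
        show (∑ k ∈ (xs.dropWhile (fun y => y == x)).toFinset,
            pvContrib m ((x :: xs).count k : Int))
          = ∑ k ∈ (xs.dropWhile (fun y => y == x)).toFinset,
            pvContrib m ((xs.dropWhile (fun y => y == x)).count k : Int) from
          Finset.sum_congr rfl (fun k hk => by rw [hcountk k hk])]
      unfold pvContrib
      split <;> ring

theorem pv_filter_sum (m : Int) (l : List Int) :
    (l.filter (fun c => c ≤ m)).sum = (l.map (pvContrib m)).sum := by
  induction l with
  | nil => rfl
  | cons c t ih =>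
    by_cases h : c ≤ m <;> simp [h, pvContrib, ih]

theorem pv_ofList_toFinset (A : List String) : (PySem.Set.ofList A).toFinset = A.toFinset := by
  ext a; simp [List.mem_toFinset, PySem.Set.mem_ofList]

theorem pv_size_eq (A : List String) : (PySem.Dict.counter A).size = A.toFinset.card := by
  show (PySem.Dict.counter A).items.length = _
  rw [PySem.Dict.items_counter A, List.length_map, ← pv_ofList_toFinset A,
    List.toFinset_card_of_nodup (PySem.Set.nodup_ofList A)]

theorem pv_sum_eq (m : Int) (A : List String) :
    (((PySem.Dict.counter A).values.filter (fun c => c ≤ m))).sum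
      = ∑ k ∈ A.toFinset, pvContrib m (A.count k : Int) := by
  have hv : (PySem.Dict.counter A).values = (PySem.Set.ofList A).map (fun k => (A.count k : Int)) := by
    show (PySem.Dict.counter A).items.map (·.2) = _
    rw [PySem.Dict.items_counter A, List.map_map]
    rfl
  rw [hv, pv_filter_sum, List.map_map, ← pv_ofList_toFinset A,
    List.sum_toFinset _ (PySem.Set.nodup_ofList A)]
  rfl

theorem can_split_squad_eq (N K D : Int) (A : List String) :
    can_split_squad N K D A = can_split_squad_alt N K D A := by
  have hperm := PySem.List.sorted_perm A (fun s => s) false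
  have hpair := PySem.List.sorted_pairwise A (fun s => s)
  have hrs : pvRunScan (PySem.Int.floordiv (N - D) 2) (PySem.List.sorted A (fun s => s) false)
      = ((A.toFinset.card : Int),
          ∑ k ∈ A.toFinset, pvContrib (PySem.Int.floordiv (N - D) 2) (A.count k : Int)) := by
    rw [pvRunScan_sorted _ _ hpair, List.toFinset_eq_of_perm _ _ hperm]
    exact congrArg _ (Finset.sum_congr rfl (fun k _ => by rw [hperm.count_eq]))
  simp only [can_split_squad, can_split_squad_alt, hrs, pv_size_eq, pv_sum_eq]
  by_cases h1 : ((A.toFinset.card : Int) < K) <;>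
    by_cases h2 : ((∑ k ∈ A.toFinset, pvContrib (PySem.Int.floordiv (N - D) 2) (A.count k : Int)) < K) <;>
    simp [h1, h2]

-- ===== VERDICT (by name: the statement is the Claim_ definition above) =====
theorem can_split_squad_spec : Claim_equal_can_split_squad := by
  intro N K D A _
  exact can_split_squad_eq N K D A
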